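-- pv_equiv track=rewrite | github.com/FaridZandi/psim | run/algo/newtiming.py | find_earliest_available_time
-- ===== SOURCE A (Python) =====
-- def find_earliest_available_time(start, end, rem, max):
--     delay = 0
--     window_sum = sum(rem[t] < max for t in range(start, end))
--     while window_sum > 0:
--         if rem[start + delay] < max:
--             window_sum -= 1
--         if rem[end + delay] < max:
--             window_sum += 1
--         delay += 1
--     return delay
-- ===== SOURCE B (Python) =====
-- def find_earliest_available_time(start, end, rem, max):
--     # Scan forward tracking the run of consecutive positions with rem[i] >= max;
--     # the first run of length end-start gives the answer.
--     L = end - start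
--     if L <= 0:
--         return 0
--     run = 0
--     i = start
--     while True:
--         if rem[i] >= max:
--             run += 1
--             if run == L:
--                 return i - L + 1 - start
--         else:
--             run = 0
--         i += 1
-- ===== Notes on version B (the rewrite author's own statement) =====
-- stated objective: alternative
-- what changed: B replaces A's sliding-window bad-count (initial sum over the window, then incrementally removing/adding endpoints each delay) with a single forward scan that tracks the length of the current run of consecutive positions with rem[i] >= max and returns as soon as the run reaches the window width.
-- outside the precondition, e.g. on find_earliest_available_time(-2, -1, [5, 0], 3): A returns 0, B returns 0
import Mathlib
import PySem

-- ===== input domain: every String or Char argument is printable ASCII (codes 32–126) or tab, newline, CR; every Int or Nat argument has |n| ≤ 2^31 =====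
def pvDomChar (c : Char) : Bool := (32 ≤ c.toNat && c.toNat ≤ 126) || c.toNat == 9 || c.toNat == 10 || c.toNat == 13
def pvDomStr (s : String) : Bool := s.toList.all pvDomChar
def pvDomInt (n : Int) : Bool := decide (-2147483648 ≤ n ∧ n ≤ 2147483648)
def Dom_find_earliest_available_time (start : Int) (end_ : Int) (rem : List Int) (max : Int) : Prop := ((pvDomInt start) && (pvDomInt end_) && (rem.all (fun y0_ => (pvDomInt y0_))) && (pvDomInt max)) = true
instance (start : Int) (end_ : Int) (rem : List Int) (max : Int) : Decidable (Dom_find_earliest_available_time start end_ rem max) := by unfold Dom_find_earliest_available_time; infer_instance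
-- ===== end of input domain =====

-- B replaces A's sliding bad-count with a single run-length scan; equal return values on Pre_ (alternative decomposition, same cost).

-- ===== PORT A =====
-- sum(rem[t] < max for t in range(start, end))
def faBadCount (rem : List Int) (max : Int) (ts : List Int) : Int :=
  (ts.map (fun t => if (PySem.List.pyGet? rem t).getD 0 < max then (1 : Int) else 0)).sum

-- the while loop of A; fuel makes it total (inside Pre_ the fuel is never exhausted)
def faLoop (start end_ : Int) (rem : List Int) (max : Int) : Nat → Int → Int → Int
  | 0, _, delay => delay
  | fuel + 1, ws, delay =>
    if 0 < ws then
      let ws1 := if (PySem.List.pyGet? rem (start + delay)).getD 0 < max then ws - 1 else ws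
      let ws2 := if (PySem.List.pyGet? rem (end_ + delay)).getD 0 < max then ws1 + 1 else ws1
      faLoop start end_ rem max fuel ws2 (delay + 1)
    else delay

def find_earliest_available_time (start : Int) (end_ : Int) (rem : List Int) (max : Int) : Int :=
  faLoop start end_ rem max (rem.length + 1)
    (faBadCount rem max (PySem.List.pyRange start end_ 1)) 0

-- ===== PORT B =====
-- B's while-True scan; `none` (IndexError in Python B) and exhausted fuel return a junk 0, both unreachable inside Pre_
def fbLoop (start : Int) (rem : List Int) (max L : Int) : Nat → Int → Int → Int
  | 0, _, _ => 0
  | fuel + 1, i, run =>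
    match PySem.List.pyGet? rem i with
    | none => 0
    | some v =>
      if max ≤ v then
        if run + 1 = L then i - L + 1 - start
        else fbLoop start rem max L fuel (i + 1) (run + 1)
      else fbLoop start rem max L fuel (i + 1) 0

def find_earliest_available_time_alt (start : Int) (end_ : Int) (rem : List Int) (max : Int) : Int :=
  if end_ - start ≤ 0 then 0
  else fbLoop start rem max (end_ - start) (rem.length + 1) start 0

-- ===== PRECONDITION & SPEC =====
-- Pre_ = the inputs on which A returns without an IndexError, restricted to the natural domain 0 ≤ start:
-- it excludes inputs where the scan runs off the array (A raises IndexError) and negative start/end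
-- (Python negative-index wraparound, outside the function's time-axis purpose; A and B happen to agree there too).
def Pre_find_earliest_available_time (start : Int) (end_ : Int) (rem : List Int) (max : Int) : Prop :=
  end_ ≤ start ∨
  (0 ≤ start ∧ start < end_ ∧ end_ ≤ (rem.length : Int) ∧
    ∃ d ∈ Finset.range (rem.length + 1),
      end_ + d ≤ (rem.length : Int) ∧
      ∀ j ∈ Finset.range (end_ - start).toNat,
        max ≤ (PySem.List.pyGet? rem (start + d + j)).getD 0)
instance (start : Int) (end_ : Int) (rem : List Int) (max : Int) : Decidable (Pre_find_earliest_available_time start end_ rem max) := by unfold Pre_find_earliest_available_time; infer_instance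

def pvWitness_find_earliest_available_time : Int × Int × List Int × Int := (0, 1, [5], 0)

def Spec_find_earliest_available_time (start : Int) (end_ : Int) (rem : List Int) (max : Int) (out : Int) : Prop := out = find_earliest_available_time_alt start end_ rem max
instance (start : Int) (end_ : Int) (rem : List Int) (max : Int) (out : Int) : Decidable (Spec_find_earliest_available_time start end_ rem max out) := by unfold Spec_find_earliest_available_time; infer_instance

-- ===== CLAIM (what is proved, stated in full; the proofs are below) =====
def Claim_equal_find_earliest_available_time : Prop := ∀ (start : Int) (end_ : Int) (rem : List Int) (max : Int), Dom_find_earliest_available_time start end_ rem max → Pre_find_earliest_available_time start end_ rem max → Spec_find_earliest_available_time start end_ rem max (find_earliest_available_time start end_ rem max)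

-- ===== LEMMAS AND PROOFS =====

-- t is "available": rem[t] >= max
def pvGood (rem : List Int) (max t : Int) : Prop := max ≤ (PySem.List.pyGet? rem t).getD 0

-- the window at delay k is clear
def pvClr (start end_ : Int) (rem : List Int) (max k : Int) : Prop :=
  ∀ t : Int, start + k ≤ t → t < end_ + k → pvGood rem max t

-- kstar is the minimal clear delay, with the window in bounds
def pvMin (start end_ : Int) (rem : List Int) (max kstar : Int) : Prop :=
  0 ≤ kstar ∧ end_ + kstar ≤ (rem.length : Int) ∧ pvClr start end_ rem max kstar ∧
  ∀ j : Int, 0 ≤ j → j < kstar → ¬ pvClr start end_ rem max j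

theorem faBadCount_cons (rem : List Int) (max t : Int) (ts : List Int) :
    faBadCount rem max (t :: ts)
      = (if (PySem.List.pyGet? rem t).getD 0 < max then (1 : Int) else 0) + faBadCount rem max ts := by
  simp [faBadCount]

theorem faBadCount_append (rem : List Int) (max : Int) (ts us : List Int) :
    faBadCount rem max (ts ++ us) = faBadCount rem max ts + faBadCount rem max us := by
  simp [faBadCount]

theorem faBadCount_nonneg (rem : List Int) (max : Int) (ts : List Int) :
    0 ≤ faBadCount rem max ts := by
  induction ts with
  | nil => simp [faBadCount]
  | cons t ts ih => rw [faBadCount_cons]; split_ifs <;> omega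

theorem faBadCount_eq_zero_iff (rem : List Int) (max : Int) (ts : List Int) :
    faBadCount rem max ts = 0 ↔ ∀ t ∈ ts, pvGood rem max t := by
  induction ts with
  | nil => simp [faBadCount]
  | cons t ts ih =>
    rw [faBadCount_cons]
    have hnn := faBadCount_nonneg rem max ts
    constructor
    · intro h u hu
      rcases List.mem_cons.mp hu with h' | h'
      · subst h'
        by_contra hbad
        simp only [pvGood, not_le] at hbad
        rw [if_pos hbad] at h; omega
      · apply ih.mp _ u h'
        split_ifs at h <;> omega
    · intro h
      have h1 : ¬ ((PySem.List.pyGet? rem t).getD 0 < max) := by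
        have := h t (List.mem_cons_self)
        simpa [pvGood, not_lt] using this
      rw [if_neg h1, ih.mpr (fun u hu => h u (List.mem_cons_of_mem _ hu))]
      ring

theorem faBadCount_step (start end_ : Int) (rem : List Int) (max : Int) (hse : start < end_) (k : Int) :
    faBadCount rem max (PySem.List.pyRange (start + (k + 1)) (end_ + (k + 1)) 1)
      = faBadCount rem max (PySem.List.pyRange (start + k) (end_ + k) 1)
        - (if (PySem.List.pyGet? rem (start + k)).getD 0 < max then 1 else 0)
        + (if (PySem.List.pyGet? rem (end_ + k)).getD 0 < max then 1 else 0) := by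
  have h1 : PySem.List.pyRange (start + k) (end_ + k) 1
      = (start + k) :: PySem.List.pyRange (start + k + 1) (end_ + k) 1 :=
    PySem.List.pyRange_one_cons (by omega)
  have h2 : PySem.List.pyRange (start + (k + 1)) (end_ + (k + 1)) 1
      = PySem.List.pyRange (start + k + 1) (end_ + k) 1 ++ [end_ + k] := by
    have h3 := PySem.List.pyRange_one_succ_right (a := start + k + 1) (b := end_ + k) (by omega)
    have e1 : start + (k + 1) = start + k + 1 := by ring
    have e2 : end_ + (k + 1) = (end_ + k) + 1 := by ring
    rw [e1, e2, h3]
  rw [h2, h1]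
  simp only [faBadCount_append, faBadCount_cons]
  simp only [faBadCount, List.map_nil, List.sum_nil]
  split_ifs <;> ring

theorem nat_exists_minimal {Q : Nat → Prop} (h : ∃ d, Q d) : ∃ d, Q d ∧ ∀ e, e < d → ¬ Q e := by
  classical
  obtain ⟨d, hd⟩ := h
  induction d using Nat.strong_induction_on with
  | _ d ih =>
    by_cases h' : ∃ e, e < d ∧ Q e
    · obtain ⟨e, he, hQ⟩ := h'
      exact ih e he hQ
    · exact ⟨d, hd, fun e he hQ => h' ⟨e, he, hQ⟩⟩

theorem pvMin_of_pre (start end_ : Int) (rem : List Int) (max : Int)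
    (hse : start < end_)
    (hex : ∃ d ∈ Finset.range (rem.length + 1),
      end_ + d ≤ (rem.length : Int) ∧
      ∀ j ∈ Finset.range (end_ - start).toNat,
        max ≤ (PySem.List.pyGet? rem (start + d + j)).getD 0) :
    ∃ kstar, pvMin start end_ rem max kstar := by
  obtain ⟨d, _, hdb, hdg⟩ := hex
  have hexQ : ∃ d : Nat, end_ + (d : Int) ≤ (rem.length : Int) ∧
      ∀ j ∈ Finset.range (end_ - start).toNat,
        max ≤ (PySem.List.pyGet? rem (start + d + j)).getD 0 := ⟨d, hdb, hdg⟩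
  obtain ⟨d0, ⟨hb0, hg0⟩, hmin0⟩ := nat_exists_minimal hexQ
  refine ⟨(d0 : Int), by positivity, hb0, ?_, ?_⟩
  · intro t h1 h2
    have hjnn : (0 : Int) ≤ t - start - d0 := by omega
    have hj : ((t - start - (d0 : Int)).toNat : Int) = t - start - d0 := by omega
    have hjlt : (t - start - (d0 : Int)).toNat ∈ Finset.range (end_ - start).toNat := by
      rw [Finset.mem_range]; omega
    have := hg0 _ hjlt
    have he : start + (d0 : Int) + ((t - start - (d0 : Int)).toNat : Int) = t := by omega
    rw [he] at this
    exact this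
  · intro j hj0 hjlt hclr
    have hne : ¬ (end_ + (j.toNat : Int) ≤ (rem.length : Int) ∧
        ∀ jj ∈ Finset.range (end_ - start).toNat,
          max ≤ (PySem.List.pyGet? rem (start + j.toNat + jj)).getD 0) := by
      apply hmin0
      omega
    apply hne
    refine ⟨by omega, ?_⟩
    intro jj hjj
    rw [Finset.mem_range] at hjj
    have h1 : start + j ≤ start + (j.toNat : Int) + (jj : Int) := by omega
    have h2 : start + (j.toNat : Int) + (jj : Int) < end_ + j := by omega
    have := hclr _ h1 h2
    simpa [pvGood] using this

theorem faLoop_eq (start end_ : Int) (rem : List Int) (max kstar : Int)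
    (hse : start < end_) (hmin : pvMin start end_ rem max kstar) :
    ∀ (fuel : Nat) (k : Int), 0 ≤ k → k ≤ kstar → kstar - k < (fuel : Int) →
      faLoop start end_ rem max fuel
        (faBadCount rem max (PySem.List.pyRange (start + k) (end_ + k) 1)) k = kstar := by
  intro fuel
  induction fuel with
  | zero => intro k _ hkk hf; exfalso; simp at hf; omega
  | succ fuel ih =>
    intro k hk0 hkk hf
    by_cases hke : k = kstar
    · subst hke
      have hz : faBadCount rem max (PySem.List.pyRange (start + k) (end_ + k) 1) = 0 := by
        rw [faBadCount_eq_zero_iff]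
        intro t ht
        rw [PySem.List.mem_pyRange_one] at ht
        exact hmin.2.2.1 t ht.1 ht.2
      rw [hz]
      simp [faLoop]
    · have hklt : k < kstar := lt_of_le_of_ne hkk hke
      have hnz : faBadCount rem max (PySem.List.pyRange (start + k) (end_ + k) 1) ≠ 0 := by
        intro hz
        apply hmin.2.2.2 k hk0 hklt
        intro t h1 h2
        exact (faBadCount_eq_zero_iff rem max _).mp hz t
          (PySem.List.mem_pyRange_one.mpr ⟨h1, h2⟩)
      have hpos : 0 < faBadCount rem max (PySem.List.pyRange (start + k) (end_ + k) 1) :=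
        lt_of_le_of_ne (faBadCount_nonneg rem max _) (Ne.symm hnz)
      have hstep := faBadCount_step start end_ rem max hse k
      simp only [faLoop, if_pos hpos]
      have harg :
          (if (PySem.List.pyGet? rem (end_ + k)).getD 0 < max then
            (if (PySem.List.pyGet? rem (start + k)).getD 0 < max then
              faBadCount rem max (PySem.List.pyRange (start + k) (end_ + k) 1) - 1
            else faBadCount rem max (PySem.List.pyRange (start + k) (end_ + k) 1)) + 1
          else
            (if (PySem.List.pyGet? rem (start + k)).getD 0 < max then
              faBadCount rem max (PySem.List.pyRange (start + k) (end_ + k) 1) - 1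
            else faBadCount rem max (PySem.List.pyRange (start + k) (end_ + k) 1)))
          = faBadCount rem max (PySem.List.pyRange (start + (k + 1)) (end_ + (k + 1)) 1) := by
        rw [hstep]; split_ifs <;> ring
      rw [harg]
      exact ih (k + 1) (by omega) (by omega) (by push_cast at hf ⊢; omega)

theorem fbLoop_eq (start end_ : Int) (rem : List Int) (max kstar : Int)
    (hs0 : 0 ≤ start) (hse : start < end_) (hmin : pvMin start end_ rem max kstar) :
    ∀ (fuel : Nat) (i run : Int),
      start ≤ i - run → 0 ≤ run → run < end_ - start →
      (∀ t, i - run ≤ t → t < i → pvGood rem max t) →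
      (start < i - run → ¬ pvGood rem max (i - run - 1)) →
      (∀ p, start ≤ p → p + (end_ - start) ≤ i →
        ∃ b, p ≤ b ∧ b < p + (end_ - start) ∧ ¬ pvGood rem max b) →
      end_ + kstar - i ≤ (fuel : Int) →
      fbLoop start rem max (end_ - start) fuel i run = kstar := by
  intro fuel
  induction fuel with
  | zero =>
    intro i run h1 h2 h3 h4 h5 h6 hf
    exfalso
    have hk0 : 0 ≤ kstar := hmin.1
    have hiub : i < end_ + kstar := by
      by_contra hge
      obtain ⟨b, hb1, hb2, hb3⟩ := h6 (start + kstar) (by omega) (by omega)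
      exact hb3 (hmin.2.2.1 b (by omega) (by omega))
    simp at hf; omega
  | succ fuel ih =>
    intro i run h1 h2 h3 h4 h5 h6 hf
    have hk0 : 0 ≤ kstar := hmin.1
    have hiub : i < end_ + kstar := by
      by_contra hge
      obtain ⟨b, hb1, hb2, hb3⟩ := h6 (start + kstar) (by omega) (by omega)
      exact hb3 (hmin.2.2.1 b (by omega) (by omega))
    have hi0 : 0 ≤ i := by omega
    have hin : i < (rem.length : Int) := by have := hmin.2.1; omega
    have hget : PySem.List.pyGet? rem i = some (rem[i.toNat]'(by omega)) :=
      PySem.List.pyGet?_eq_some_getElem rem hi0 hin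
    have hgood_iff : pvGood rem max i ↔ max ≤ rem[i.toNat]'(by omega) := by
      simp [pvGood, hget]
    simp only [fbLoop, hget]
    by_cases hgood : max ≤ rem[i.toNat]'(by omega)
    · rw [if_pos hgood]
      by_cases hrl : run + 1 = end_ - start
      · rw [if_pos hrl]
        have hclr : pvClr start end_ rem max (i - run - start) := by
          intro t ht1 ht2
          by_cases hti : t = i
          · subst hti; exact hgood_iff.mpr hgood
          · exact h4 t (by omega) (by omega)
        have hge : kstar ≤ i - run - start := by
          by_contra hlt
          exact hmin.2.2.2 (i - run - start) (by omega) (by omega) hclr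
        have hle : i - run - start ≤ kstar := by
          by_contra hgt
          obtain ⟨b, hb1, hb2, hb3⟩ := h6 (start + kstar) (by omega) (by omega)
          exact hb3 (hmin.2.2.1 b (by omega) (by omega))
        omega
      · rw [if_neg hrl]
        apply ih (i + 1) (run + 1) (by omega) (by omega) (by omega)
        · intro t ht1 ht2
          by_cases hti : t = i
          · subst hti; exact hgood_iff.mpr hgood
          · exact h4 t (by omega) (by omega)
        · intro hgt
          have : i + 1 - (run + 1) - 1 = i - run - 1 := by ring
          rw [this]
          exact h5 (by omega)
        · intro p hp1 hp2
          by_cases hpe : p + (end_ - start) = i + 1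
          · by_cases hrs : start < i - run
            · exact ⟨i - run - 1, by omega, by omega, h5 hrs⟩
            · exfalso; omega
          · exact h6 p hp1 (by omega)
        · push_cast at hf ⊢; omega
    · rw [if_neg hgood]
      apply ih (i + 1) 0 (by omega) (by omega) (by omega)
      · intro t ht1 ht2; omega
      · intro _
        have : i + 1 - 0 - 1 = i := by ring
        rw [this]
        exact fun hg => hgood (hgood_iff.mp hg)
      · intro p hp1 hp2
        by_cases hpe : p + (end_ - start) = i + 1
        · exact ⟨i, by omega, by omega, fun hg => hgood (hgood_iff.mp hg)⟩
        · exact h6 p hp1 (by omega)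
      · push_cast at hf ⊢; omega

-- ===== VERDICT (by name: the statement is the Claim_ definition above) =====
theorem find_earliest_available_time_spec : Claim_equal_find_earliest_available_time := by
  intro start end_ rem max _ hpre
  unfold Spec_find_earliest_available_time
  rcases hpre with hle | ⟨hs0, hse, hn, hex⟩
  · have hA : find_earliest_available_time start end_ rem max = 0 := by
      unfold find_earliest_available_time
      rw [PySem.List.pyRange_one_eq_nil hle]
      have hz : faBadCount rem max ([] : List Int) = 0 := by simp [faBadCount]
      rw [hz]
      simp [faLoop]
    have hB : find_earliest_available_time_alt start end_ rem max = 0 := by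
      unfold find_earliest_available_time_alt
      rw [if_pos (by omega)]
    rw [hA, hB]
  · obtain ⟨kstar, hmin⟩ := pvMin_of_pre start end_ rem max hse hex
    have hA : find_earliest_available_time start end_ rem max = kstar := by
      unfold find_earliest_available_time
      have h0 := faLoop_eq start end_ rem max kstar hse hmin (rem.length + 1) 0
        le_rfl hmin.1 (by have := hmin.2.1; push_cast; omega)
      simpa using h0
    have hB : find_earliest_available_time_alt start end_ rem max = kstar := by
      unfold find_earliest_available_time_alt
      rw [if_neg (by omega)]
      apply fbLoop_eq start end_ rem max kstar hs0 hse hmin (rem.length + 1) start 0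
        (by omega) (by omega) (by omega)
      · intro t ht1 ht2; omega
      · intro h; omega
      · intro p hp1 hp2; exfalso; omega
      · have := hmin.2.1; push_cast; omega
    rw [hA, hB]
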